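-- pv_equiv track=rewrite | github.com/pypi-data/pypi-mirror-241 | packages/web-engine/web_engine-0.1.0.tar.gz/web_engine-0.1.0/src/web_engine/__main__.py | auto_pdf
-- ===== SOURCE A (Python) =====
-- import string
--
-- tailphrases = list(string.digits) + ["-"]
--
-- def flatten_char(char):
--     if char in string.ascii_letters:
--         return char
--     if char in string.digits:
--         return char
--     return '-'
--
-- def auto_pdf(url):
--     url = url.split('/')[-1]
--     url = "".join(flatten_char(x) for x in url)
--     url = url.strip("-")
--     while True:
--         _url = url
--         for phrase in tailphrases:
--             if url.endswith(phrase):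
--                 url = url[:-len(phrase)]
--         if url == _url:
--             break
--     if url == "":
--         url = "a"
--     url += ".pdf"
--     return url
-- ===== SOURCE B (Python) =====
-- import string
--
-- _ALNUM = set(string.ascii_letters + string.digits)
-- _LETTERS = string.ascii_letters
--
--
-- def auto_pdf(url):
--     seg = url.split('/')[-1]
--     # drop leading non-alphanumerics (they would flatten to dashes and be stripped)
--     while seg and seg[0] not in _ALNUM:
--         seg = seg[1:]
--     # drop trailing non-letters (the whole trailing run of digits/specials goes)
--     while seg and seg[-1] not in _LETTERS:
--         seg = seg[:-1]
--     if not seg: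
--         return "a.pdf"
--     return "".join(c if c in _ALNUM else "-" for c in seg) + ".pdf"
-- ===== Notes on version B (the rewrite author's own statement) =====
-- stated objective: simpler
-- what changed: B trims the original segment directly (one forward scan dropping leading non-alphanumerics, one backward scan dropping trailing non-letters) and dash-flattens only the kept slice, replacing A's flatten-everything + strip('-') + fixpoint while-loop over an 11-phrase endswith table.
import Mathlib
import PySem

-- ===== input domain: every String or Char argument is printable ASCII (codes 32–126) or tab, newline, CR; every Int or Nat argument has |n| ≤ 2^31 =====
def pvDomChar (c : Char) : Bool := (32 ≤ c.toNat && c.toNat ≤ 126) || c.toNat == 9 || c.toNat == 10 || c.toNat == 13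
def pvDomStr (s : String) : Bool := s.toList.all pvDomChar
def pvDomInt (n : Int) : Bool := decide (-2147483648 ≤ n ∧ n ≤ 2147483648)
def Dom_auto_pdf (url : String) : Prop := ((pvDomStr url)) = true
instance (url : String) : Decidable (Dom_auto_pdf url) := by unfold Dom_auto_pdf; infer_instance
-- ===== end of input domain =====

-- B replaces A's flatten-then-strip-then-fixpoint-loop pipeline by two simple end trims of the
-- original segment (drop leading non-alphanumerics, drop trailing non-letters) followed by one
-- dash-substitution pass over the kept slice only; objective: simpler.

-- ===== PORT A =====
-- string.ascii_letters and string.digits ('x in s' on a 1-char x is char membership)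
def pvLettersA : List Char := "abcdefghijklmnopqrstuvwxyzABCDEFGHIJKLMNOPQRSTUVWXYZ".toList
def pvDigitsA : List Char := "0123456789".toList
-- tailphrases = list(string.digits) + ["-"]
def tailphrasesA : List (List Char) := pvDigitsA.map (fun c => [c]) ++ [['-']]

def flatten_char (c : Char) : Char :=
  if pvLettersA.contains c then c
  else if pvDigitsA.contains c then c
  else '-'

-- body of the inner 'for phrase in tailphrases: if url.endswith(phrase): url = url[:-len(phrase)]'
def stepA (u : List Char) (p : List Char) : List Char :=
  if PySem.Chars.endswith u p then PySem.List.slice u none (some (-(p.length : Int))) else u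

-- one iteration of the 'while True' body (the inner for-loop)
def passA (u : List Char) : List Char := tailphrasesA.foldl stepA u

-- 'while True: ... if url == _url: break'.  A pass that changes the string strictly shortens
-- it (proved in passA_lt below), so the loop reaches its fixpoint in at most length+1 passes;
-- the fuel argument is only a totality guard, the computation is the Python loop unchanged.
def loopA (fuel : Nat) (u : List Char) : List Char :=
  match fuel with
  | 0 => u
  | fuel + 1 => if passA u = u then u else loopA fuel (passA u)

def auto_pdf (url : String) : String :=
  -- url.split('/')[-1]  (split('/') is never empty, so the [-1] never raises and .getD [] is never used)
  let seg := (PySem.List.pyGet? (PySem.Chars.splitOn url.toList ['/']) (-1)).getD []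
  -- "".join(flatten_char(x) for x in url)
  let flat := seg.map flatten_char
  -- url.strip("-")
  let stripped := PySem.Chars.stripChars flat ['-']
  -- the while True loop
  let res := loopA (stripped.length + 1) stripped
  -- if url == "": url = "a"
  let res := if res = [] then ['a'] else res
  -- url += ".pdf"
  String.ofList (res ++ ".pdf".toList)

-- ===== PORT B =====
def pvLettersB : List Char := "abcdefghijklmnopqrstuvwxyzABCDEFGHIJKLMNOPQRSTUVWXYZ".toList
-- _ALNUM = set(string.ascii_letters + string.digits)
def pvAlnumB : PySem.Set Char := PySem.Set.ofList (pvLettersB ++ "0123456789".toList)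

-- while seg and not seg[0] in _ALNUM: seg = seg[1:]
def trimL (cs : List Char) : List Char :=
  match cs with
  | [] => []
  | c :: rest => if !(pvAlnumB.contains c) then trimL rest else c :: rest

-- while seg and not seg[-1] in _LETTERS: seg = seg[:-1]
def trimR (cs : List Char) : List Char :=
  if h : cs = [] then cs
  else if !(pvLettersB.contains (cs.getLast h)) then trimR cs.dropLast else cs
termination_by cs.length
decreasing_by
  simp only [List.length_dropLast]
  have : cs.length ≠ 0 := by simpa using List.length_eq_zero_iff.not.mpr h
  omega

def auto_pdf_alt (url : String) : String :=
  let seg := (PySem.List.pyGet? (PySem.Chars.splitOn url.toList ['/']) (-1)).getD []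
  let core := trimR (trimL seg)
  if core = [] then "a.pdf"
  else String.ofList (core.map (fun c => if pvAlnumB.contains c then c else '-') ++ ".pdf".toList)

-- ===== PRECONDITION & SPEC =====
def Spec_auto_pdf (url : String) (out : String) : Prop := out = auto_pdf_alt url
instance (url : String) (out : String) : Decidable (Spec_auto_pdf url out) := by unfold Spec_auto_pdf; infer_instance

-- ===== CLAIM (what is proved, stated in full; the proofs are below) =====
def Claim_equal_auto_pdf : Prop := ∀ (url : String), Dom_auto_pdf url → Spec_auto_pdf url (auto_pdf url)

-- ===== LEMMAS AND PROOFS =====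

theorem stepA_eq_or_lt (u p : List Char) : stepA u p = u ∨ (stepA u p).length < u.length := by
  unfold stepA
  split
  · have hs : PySem.List.slice u none (some (-(p.length : Int))) =
        u.take (PySem.List.clampIdx u.length (-(p.length : Int))) := by
      simp [PySem.List.slice]
    rw [hs]
    by_cases hle : u.length ≤ PySem.List.clampIdx u.length (-(p.length : Int))
    · left; exact List.take_of_length_le hle
    · right; rw [List.length_take]; omega
  · left; rfl

theorem foldl_stepA_le (l : List (List Char)) (u : List Char) :
    (l.foldl stepA u).length ≤ u.length := by
  induction l generalizing u with
  | nil => simp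
  | cons p l ih =>
    simp only [List.foldl_cons]
    rcases stepA_eq_or_lt u p with h | h
    · rw [h]; exact ih u
    · exact le_trans (ih _) (le_of_lt h)

theorem foldl_stepA_eq_or_lt (l : List (List Char)) (u : List Char) :
    l.foldl stepA u = u ∨ (l.foldl stepA u).length < u.length := by
  induction l generalizing u with
  | nil => left; rfl
  | cons p l ih =>
    simp only [List.foldl_cons]
    rcases stepA_eq_or_lt u p with h | h
    · rw [h]; exact ih u
    · right; exact lt_of_le_of_lt (foldl_stepA_le l _) h

theorem passA_lt (u : List Char) (h : passA u ≠ u) : (passA u).length < u.length :=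
  (foldl_stepA_eq_or_lt tailphrasesA u).resolve_left h

-- the two character classes the pipeline really tests
def pAln (c : Char) : Bool := pvLettersA.contains c || pvDigitsA.contains c
def pT (c : Char) : Bool := pvDigitsA.contains c || (c == '-')

-- one endswith-chop step of A's inner for-loop, seen from the reversed string
def stepR (v : List Char) (c : Char) : List Char := if v.head? = some c then v.tail else v

theorem slice_neg_one (u : List Char) : PySem.List.slice u none (some (-1)) = u.dropLast := by
  simp only [PySem.List.slice, PySem.List.clampIdx, List.dropLast_eq_take]
  norm_num
  split
  next h => subst h; simp
  next h =>
    have : 0 < u.length := List.length_pos_iff.mpr h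
    omega

theorem suffix_singleton (t : List Char) (d c : Char) : ([c] <:+ t ++ [d]) ↔ c = d := by
  constructor
  · rintro ⟨ys, hy⟩
    have := congrArg List.getLast? hy
    simpa [List.getLast?_append] using this
  · rintro rfl; exact ⟨t, rfl⟩

theorem endswith_single (u : List Char) (c : Char) :
    PySem.Chars.endswith u [c] = (u.reverse.head? == some c) := by
  rcases h : u.reverse with _ | ⟨d, t⟩
  · have hu : u = [] := by simpa using congrArg List.reverse h
    subst hu; simp [PySem.Chars.endswith, List.isSuffixOf]
  · have hu : u = t.reverse ++ [d] := by simpa using congrArg List.reverse h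
    subst hu
    by_cases hdc : c = d
    · subst hdc
      rw [(PySem.Chars.endswith_iff _ _).mpr ((suffix_singleton _ _ _).mpr rfl)]
      simp
    · have h1 : PySem.Chars.endswith (t.reverse ++ [d]) [c] = false := by
        apply Bool.eq_false_iff.mpr
        intro hc
        exact hdc ((suffix_singleton _ _ _).mp ((PySem.Chars.endswith_iff _ _).mp hc))
      rw [h1]
      simp
      exact fun hh => hdc hh.symm

theorem stepA_singleton (u : List Char) (c : Char) :
    stepA u [c] = (stepR u.reverse c).reverse := by
  unfold stepA stepR
  rw [endswith_single]
  rcases h : u.reverse with _ | ⟨d, t⟩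
  · have hu : u = [] := by simpa using congrArg List.reverse h
    subst hu; simp
  · have hu : u = t.reverse ++ [d] := by simpa using congrArg List.reverse h
    by_cases hdc : d = c
    · subst hdc
      rw [if_pos (show ((d :: t).head? == some d) = true by simp),
          if_pos (show (d :: t).head? = some d by simp)]
      have h2 : -((([d] : List Char).length : Int)) = -1 := by simp
      rw [h2, slice_neg_one, hu]
      simp
    · rw [if_neg (show ¬ ((d :: t).head? == some c) = true by simp; exact hdc),
          if_neg (show ¬ (d :: t).head? = some c by simp; exact hdc)]
      rw [hu]
      simp

theorem foldl_stepA_map_singleton (l : List Char) (u : List Char) :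
    (l.map (fun c => [c])).foldl stepA u = ((l.foldl stepR u.reverse)).reverse := by
  induction l generalizing u with
  | nil => simp
  | cons c l ih =>
    simp only [List.map_cons, List.foldl_cons]
    rw [stepA_singleton, ih]
    simp

theorem passA_rev (u : List Char) :
    passA u = ((pvDigitsA ++ ['-']).foldl stepR u.reverse).reverse := by
  have ht : tailphrasesA = (pvDigitsA ++ ['-']).map (fun c => [c]) := by
    simp [tailphrasesA]
  unfold passA
  rw [ht, foldl_stepA_map_singleton]

theorem stepR_dropWhile (v : List Char) (c : Char) (h : pT c = true) :
    (stepR v c).dropWhile pT = v.dropWhile pT := by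
  unfold stepR
  split
  next hh =>
    rcases v with _ | ⟨a, t⟩
    · rfl
    · have ha : a = c := by simpa using hh
      subst ha
      simp [List.dropWhile_cons, h]
  next => rfl

theorem foldl_stepR_dropWhile (l : List Char) (v : List Char) (h : ∀ c ∈ l, pT c = true) :
    (l.foldl stepR v).dropWhile pT = v.dropWhile pT := by
  induction l generalizing v with
  | nil => rfl
  | cons a l ih =>
    simp only [List.foldl_cons]
    rw [ih _ (fun c hc => h c (List.mem_cons_of_mem a hc)),
        stepR_dropWhile v a (h a List.mem_cons_self)]

theorem stepR_le (v : List Char) (c : Char) : (stepR v c).length ≤ v.length := by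
  unfold stepR
  split
  · simpa using Nat.sub_le v.length 1
  · exact le_refl _

theorem foldl_stepR_le (l : List Char) (v : List Char) :
    (l.foldl stepR v).length ≤ v.length := by
  induction l generalizing v with
  | nil => exact le_refl _
  | cons a l ih =>
    simp only [List.foldl_cons]
    exact le_trans (ih _) (stepR_le v a)

theorem foldl_stepR_progress (l : List Char) (v : List Char) (c₀ : Char)
    (hm : c₀ ∈ l) (hh : v.head? = some c₀) : (l.foldl stepR v).length < v.length := by
  induction l generalizing v with
  | nil => simp at hm
  | cons a l ih =>
    rcases v with _ | ⟨b, t⟩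
    · simp at hh
    have hb : b = c₀ := by simpa using hh
    subst hb
    simp only [List.foldl_cons]
    by_cases hab : a = b
    · have hstep : stepR (b :: t) a = t := by simp [stepR, hab]
      rw [hstep]
      have := foldl_stepR_le l t
      simp only [List.length_cons]
      omega
    · have hstep : stepR (b :: t) a = b :: t := by
        simp only [stepR, List.head?_cons]
        rw [if_neg (by simp; exact fun hba => hab hba.symm)]
      rw [hstep]
      have hm2 : b ∈ l := by
        rcases List.mem_cons.mp hm with h | h
        · exact absurd h.symm hab
        · exact h
      exact ih (b :: t) hm2 rfl

theorem pT_iff_mem (c : Char) : pT c = true ↔ c ∈ pvDigitsA ++ ['-'] := by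
  unfold pT
  rw [List.mem_append, List.contains_eq_mem]
  simp

theorem fix_dropWhile (u : List Char) (h : passA u = u) :
    (u.reverse.dropWhile pT).reverse = u := by
  have hrev : (pvDigitsA ++ ['-']).foldl stepR u.reverse = u.reverse := by
    have hp := passA_rev u
    rw [h] at hp
    have := congrArg List.reverse hp
    simpa using this.symm
  rcases hv : u.reverse with _ | ⟨d, t⟩
  · have hu : u = [] := by simpa using congrArg List.reverse hv
    simp [hu]
  · by_cases hT : pT d = true
    · exfalso
      have hd : d ∈ pvDigitsA ++ ['-'] := (pT_iff_mem d).mp hT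
      have hprog := foldl_stepR_progress _ u.reverse d hd (by rw [hv]; rfl)
      rw [hrev] at hprog
      exact lt_irrefl _ hprog
    · rw [List.dropWhile_cons_of_neg (by simpa using hT)]
      have hu2 : u = (d :: t).reverse := by simpa using congrArg List.reverse hv
      exact hu2.symm

theorem loopA_eq_aux (n : Nat) : ∀ u : List Char, u.length < n →
    loopA n u = (u.reverse.dropWhile pT).reverse := by
  induction n with
  | zero =>
    intro u hu
    exact absurd hu (Nat.not_lt_zero _)
  | succ n ihn =>
    intro u hu
    rw [show loopA (n + 1) u = if passA u = u then u else loopA n (passA u) from rfl]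
    by_cases h : passA u = u
    · rw [if_pos h, fix_dropWhile u h]
    · rw [if_neg h]
      have hlt := passA_lt u h
      rw [ihn (passA u) (by omega)]
      have hx : (passA u).reverse = (pvDigitsA ++ ['-']).foldl stepR u.reverse := by
        rw [passA_rev]; simp
      have hdw : (passA u).reverse.dropWhile pT = u.reverse.dropWhile pT := by
        rw [hx]
        exact foldl_stepR_dropWhile _ _ (fun c hc => (pT_iff_mem c).mpr hc)
      rw [hdw]

theorem loopA_eq (u : List Char) : loopA (u.length + 1) u = (u.reverse.dropWhile pT).reverse :=
  loopA_eq_aux (u.length + 1) u (Nat.lt_succ_self _)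

-- pointwise facts about flatten_char
theorem flatten_eq (c : Char) : flatten_char c = if pAln c then c else '-' := by
  unfold flatten_char pAln
  by_cases hl : c ∈ pvLettersA
  · simp [hl]
  · by_cases hd : c ∈ pvDigitsA <;> simp [hl, hd]

theorem flat_dash (c : Char) : (['-'].contains (flatten_char c)) = !(pAln c) := by
  rw [flatten_eq]
  by_cases h : pAln c = true
  · have hne : c ≠ '-' := by
      rintro rfl
      exact absurd h (by decide)
    simp [h, hne]
  · have h' : pAln c = false := Bool.eq_false_iff.mpr h
    simp [h']

theorem flat_T (c : Char) : pT (flatten_char c) = !(pvLettersA.contains c) := by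
  have hall : pvLettersA.all (fun c => !(pvDigitsA.contains c) && !(c == '-')) = true := by decide
  rw [flatten_eq]
  unfold pT pAln
  by_cases hl : c ∈ pvLettersA
  · have hcc := List.all_eq_true.mp hall c hl
    simp only [Bool.and_eq_true, Bool.not_eq_true'] at hcc
    have hnd : c ∉ pvDigitsA := by
      intro hmm
      rw [List.contains_iff_mem.mpr hmm] at hcc
      exact absurd hcc.1 (by simp)
    have hne : c ≠ '-' := by
      intro hmm
      rw [hmm] at hcc
      simp at hcc
    simp [hl, hnd, hne]
  · by_cases hd : c ∈ pvDigitsA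
    · simp [hl, hd]
    · simp [hl, hd]

theorem dropWhile_dropWhile (p q : Char → Bool) (h : ∀ c, q c = true → p c = true)
    (l : List Char) : (l.dropWhile q).dropWhile p = l.dropWhile p := by
  induction l with
  | nil => rfl
  | cons a l ih =>
    by_cases hq : q a = true
    · rw [List.dropWhile_cons_of_pos hq, List.dropWhile_cons_of_pos (h a hq), ih]
    · rw [List.dropWhile_cons_of_neg (by simp [hq])]

theorem alnumB_contains (c : Char) : pvAlnumB.contains c = pAln c := by
  unfold pAln
  have hmem : c ∈ pvAlnumB ↔ c ∈ pvLettersA ++ pvDigitsA :=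
    PySem.Set.mem_ofList (pvLettersB ++ "0123456789".toList) c
  by_cases hm : c ∈ pvLettersA ++ pvDigitsA
  · have h1 : PySem.Set.contains pvAlnumB c = true := by
      simp [PySem.Set.contains, List.contains_iff_mem, hmem.mpr hm]
    rw [h1]
    rcases List.mem_append.mp hm with h | h <;> simp [h]
  · have h1 : PySem.Set.contains pvAlnumB c = false := by
      simp [PySem.Set.contains, List.contains_eq_mem, hmem, hm]
    rw [h1]
    rw [List.mem_append] at hm
    push_neg at hm
    simp [hm.1, hm.2]

theorem trimL_eq (cs : List Char) : trimL cs = cs.dropWhile (fun c => !(pvAlnumB.contains c)) := by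
  induction cs with
  | nil => rfl
  | cons a l ih =>
    unfold trimL
    by_cases h : a ∈ pvAlnumB
    · have hb : PySem.Set.contains pvAlnumB a = true := by
        simp [PySem.Set.contains, List.contains_iff_mem, h]
      rw [List.dropWhile_cons_of_neg (by simp [hb, h])]
      simp [hb, h]
    · have hb : PySem.Set.contains pvAlnumB a = false := by
        simp [PySem.Set.contains, List.contains_eq_mem, h]
      rw [List.dropWhile_cons_of_pos (by simp [hb, h])]
      simp [hb, h, ih]

theorem trimR_eq (cs : List Char) :
    trimR cs = (cs.reverse.dropWhile (fun c => !(pvLettersB.contains c))).reverse := by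
  induction cs using List.reverseRecOn with
  | nil => rw [trimR]; simp
  | append_singleton ys d ih =>
    rw [trimR]
    have hne : ys ++ [d] ≠ [] := by simp
    rw [dif_neg hne]
    have hlast : (ys ++ [d]).getLast hne = d := by simp
    rw [hlast]
    by_cases hd : d ∈ pvLettersB
    · have hb : pvLettersB.contains d = true := List.contains_iff_mem.mpr hd
      rw [if_neg (by simp [hb, hd])]
      rw [List.reverse_append]
      simp only [List.reverse_cons, List.reverse_nil, List.nil_append, List.singleton_append]
      rw [List.dropWhile_cons_of_neg (by simp [hb, hd])]
      simp
    · have hb : pvLettersB.contains d = false := by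
        simp [List.contains_eq_mem, hd]
      rw [if_pos (by simp [hb, hd])]
      rw [List.dropLast_concat, ih, List.reverse_append]
      simp only [List.reverse_cons, List.reverse_nil, List.nil_append, List.singleton_append]
      rw [List.dropWhile_cons_of_pos (by simp [hb, hd])]

theorem q_imp_nl (c : Char) (hq : (!(pAln c)) = true) : (!(pvLettersA.contains c)) = true := by
  unfold pAln at hq
  cases hl : pvLettersA.contains c
  · rfl
  · rw [hl] at hq; simp at hq

theorem core_eq (cs : List Char) :
    loopA ((PySem.Chars.stripChars (cs.map flatten_char) ['-']).length + 1)
        (PySem.Chars.stripChars (cs.map flatten_char) ['-'])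
      = (trimR (trimL cs)).map flatten_char := by
  have hpq : (fun c => (['-'] : List Char).contains c) ∘ flatten_char
      = (fun c => !(pAln c)) := funext flat_dash
  have hpt : pT ∘ flatten_char = (fun c => !(pvLettersA.contains c)) := funext flat_T
  have hx : PySem.Chars.stripChars (cs.map flatten_char) ['-']
      = ((((cs.dropWhile (fun c => !(pAln c))).reverse).dropWhile
            (fun c => !(pAln c))).reverse).map flatten_char := by
    simp only [PySem.Chars.stripChars]
    rw [List.dropWhile_map, hpq, ← List.map_reverse, List.dropWhile_map, hpq, ← List.map_reverse]
  rw [hx, loopA_eq, ← List.map_reverse, List.reverse_reverse, List.dropWhile_map, hpt,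
      dropWhile_dropWhile _ _ q_imp_nl, ← List.map_reverse, trimL_eq, trimR_eq]
  have hqB : (fun c => !(pvAlnumB.contains c)) = (fun c => !(pAln c)) :=
    funext fun c => by rw [alnumB_contains]
  have hlB : pvLettersB = pvLettersA := rfl
  rw [hqB, hlB]

-- ===== VERDICT (by name: the statement is the Claim_ definition above) =====
theorem auto_pdf_spec : Claim_equal_auto_pdf := by
  intro url _hdom
  unfold Spec_auto_pdf auto_pdf auto_pdf_alt
  dsimp only
  rw [core_eq]
  by_cases hK : trimR (trimL ((PySem.List.pyGet?
      (PySem.Chars.splitOn url.toList ['/']) (-1)).getD [])) = []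
  · rw [hK]
    simp
  · rw [if_neg (by simpa using hK), if_neg hK]
    have hg : ∀ c ∈ trimR (trimL ((PySem.List.pyGet?
        (PySem.Chars.splitOn url.toList ['/']) (-1)).getD [])),
        flatten_char c = if pvAlnumB.contains c then c else '-' := by
      intro c _
      rw [flatten_eq, alnumB_contains]
    rw [List.map_congr_left hg]
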